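-- pv_equiv track=rewrite | github.com/thragusjr/Personal-Projects | Python/baseIP.py | network_base_addr
-- ===== SOURCE A (Python) =====
-- def network_base_addr(ip_addr, subnet_mask):
--     ip = ip_addr.split(".")
--     sub = subnet_mask.split(".")
--
--     temp2 = 0
--     temp3 = 0
--
--     tempA = ''
--     tempB = ''
--
--     bitList = []
--     subList = []
--     cadList = []
--
--     for i in range(0, len(ip)):
--         temp2 = ip[i]
--         tempA = bin(int(temp2))
--         bitList.insert(i, tempA[2:].zfill(8))
--
--     bitString = ''.join(bitList)
--     binBitList = list(bitString)
--
--     for j in range(0, len(sub)):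
--         temp3 = sub[j]
--         tempB = bin(int(temp3))
--         subList.insert(j, tempB[2:].zfill(8))
--
--     subString = ''.join(subList)
--     binSubList = list(subString)
--
--     for a in range(0, len(binSubList)):
--         if binSubList[a] == '1' and binBitList[a] == '1':
--             cadList.insert(a, '1')
--         else:
--             cadList.insert(a, '0')
--
--     cadList = ''.join(cadList)
--
--     tempResult = []
--     result = []
--
--     for f in range(0, len(cadList), 8):
--         tempResult.append(int(cadList[f:f + 8], 2))
--
--     for r in range(0, len(tempResult)):
--         result.append(str(tempResult[r]))
--
--     delimiter = '.'
--     finalResult = delimiter.join(result)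
--
--     return finalResult
-- ===== SOURCE B (Python) =====
-- def network_base_addr(ip_addr, subnet_mask):
--     # Octet-wise integer AND instead of 32-character binary-string comparison.
--     return ".".join(str(int(a) & int(b))
--                     for a, b in zip(ip_addr.split("."), subnet_mask.split(".")))
-- ===== Notes on version B (the rewrite author's own statement) =====
-- stated objective: simpler
-- what changed: B zips the dotted octets and computes each result octet as int(a) & int(b) directly, replacing A's conversion to concatenated zero-filled binary strings, character-by-character AND over all bits, and re-chunking back to integers.
-- outside the precondition, e.g. on network_base_addr('300', '255'): A returns '150', B returns '44'; on network_base_addr('1.2', '255.0.0'): A returns '1.0.0', B returns '1.0'; on network_base_addr('-1', '255'): A returns '1', B returns '255'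
import Mathlib
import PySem

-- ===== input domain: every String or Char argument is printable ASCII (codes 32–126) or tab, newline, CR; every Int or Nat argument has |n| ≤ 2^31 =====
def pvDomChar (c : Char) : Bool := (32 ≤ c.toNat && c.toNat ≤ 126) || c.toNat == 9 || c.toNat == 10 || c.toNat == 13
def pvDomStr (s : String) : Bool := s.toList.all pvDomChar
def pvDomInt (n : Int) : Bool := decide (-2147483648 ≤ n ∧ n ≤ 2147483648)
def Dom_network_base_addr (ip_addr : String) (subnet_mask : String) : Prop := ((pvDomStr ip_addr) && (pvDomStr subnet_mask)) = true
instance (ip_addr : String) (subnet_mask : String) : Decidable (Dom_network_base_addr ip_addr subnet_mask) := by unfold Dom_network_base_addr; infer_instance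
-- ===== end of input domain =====

-- B replaces A's binary-string build / per-character AND / re-chunking by an octet-wise integer AND (objective: simpler).

-- ===== PORT A =====
-- Python's bin(n) ported by hand (PySem has no bin): repeated division building the digit string;
-- the fuel n.natAbs only makes the recursion structural (n/2 strictly decreases), the computation is exact.
def pvBinAux : Nat → Nat → List Char
  | 0, _ => []
  | fuel + 1, n => if n == 0 then [] else pvBinAux fuel (n / 2) ++ [if n % 2 == 1 then '1' else '0']

def pvBin (n : Int) : List Char :=
  let digits := if n.natAbs == 0 then ['0'] else pvBinAux n.natAbs n.natAbs
  if n < 0 then '-' :: '0' :: 'b' :: digits else '0' :: 'b' :: digits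

-- bin(int(temp))[2:].zfill(8), the block A builds for one octet string
-- (getD 0 is unreachable inside Pre_, where every field parses)
def pvBlock (s : List Char) : List Char :=
  PySem.Chars.zfill (PySem.List.slice (pvBin ((PySem.Int.ofChars? s).getD 0)) (some 2) none) 8

def network_base_addr (ip_addr : String) (subnet_mask : String) : String :=
  let ip := PySem.Chars.splitOn ip_addr.toList ['.']
  let sub := PySem.Chars.splitOn subnet_mask.toList ['.']
  let bitList := (PySem.List.pyRange 0 (PySem.List.len ip)).foldl
    (fun acc i => PySem.List.insert acc i (pvBlock (PySem.List.pyGetD ip i []))) []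
  let binBitList := PySem.Chars.join [] bitList
  let subList := (PySem.List.pyRange 0 (PySem.List.len sub)).foldl
    (fun acc j => PySem.List.insert acc j (pvBlock (PySem.List.pyGetD sub j []))) []
  let binSubList := PySem.Chars.join [] subList
  let cadList := (PySem.List.pyRange 0 (PySem.List.len binSubList)).foldl
    (fun acc a => if PySem.List.pyGetD binSubList a ' ' == '1' && PySem.List.pyGetD binBitList a ' ' == '1'
                  then PySem.List.insert acc a '1' else PySem.List.insert acc a '0') []
  let tempResult := (PySem.List.pyRange 0 (PySem.List.len cadList) 8).foldl
    (fun acc f => acc ++ [(PySem.Int.ofCharsBase? (PySem.List.slice cadList (some f) (some (f + 8))) 2).getD 0]) []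
  let result := (PySem.List.pyRange 0 (PySem.List.len tempResult)).foldl
    (fun acc r => acc ++ [PySem.Int.toChars (PySem.List.pyGetD tempResult r 0)]) []
  String.mk (PySem.Chars.join ['.'] result)

-- ===== PORT B =====
def network_base_addr_alt (ip_addr : String) (subnet_mask : String) : String :=
  let pairs := List.zip (PySem.Chars.splitOn ip_addr.toList ['.']) (PySem.Chars.splitOn subnet_mask.toList ['.'])
  String.mk (PySem.Chars.join ['.'] (pairs.map (fun p =>
    PySem.Int.toChars (PySem.Int.band ((PySem.Int.ofChars? p.1).getD 0) ((PySem.Int.ofChars? p.2).getD 0)))))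

-- ===== PRECONDITION & SPEC =====
def pvOkOctet (s : List Char) : Bool :=
  match PySem.Int.ofChars? s with
  | some v => decide (0 ≤ v ∧ v ≤ 255)
  | none => false

-- Pre_ restricts to the natural domain of the task: every dotted field of both arguments is an
-- integer octet in 0..255 and the mask has at most as many fields as the ip.  Outside it A raises
-- (ValueError on a non-integer field, IndexError when the mask carries a 1-bit beyond the ip's bits)
-- or returns an accidental value of its bit-string misalignment (octets > 255 or negative, extra
-- all-zero mask octets), which B does not reproduce.
def Pre_network_base_addr (ip_addr : String) (subnet_mask : String) : Prop :=
  (PySem.Chars.splitOn subnet_mask.toList ['.']).length ≤ (PySem.Chars.splitOn ip_addr.toList ['.']).length ∧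
  ((PySem.Chars.splitOn ip_addr.toList ['.'] ++ PySem.Chars.splitOn subnet_mask.toList ['.']).all pvOkOctet) = true

instance (ip_addr : String) (subnet_mask : String) : Decidable (Pre_network_base_addr ip_addr subnet_mask) := by
  unfold Pre_network_base_addr; infer_instance

def pvWitness_network_base_addr : String × String := ("192.168.1.10", "255.255.255.0")

def Spec_network_base_addr (ip_addr : String) (subnet_mask : String) (out : String) : Prop := out = network_base_addr_alt ip_addr subnet_mask
instance (ip_addr : String) (subnet_mask : String) (out : String) : Decidable (Spec_network_base_addr ip_addr subnet_mask out) := by unfold Spec_network_base_addr; infer_instance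

-- ===== CLAIM (what is proved, stated in full; the proofs are below) =====
def Claim_equal_network_base_addr : Prop := ∀ (ip_addr : String) (subnet_mask : String), Dom_network_base_addr ip_addr subnet_mask → Pre_network_base_addr ip_addr subnet_mask → Spec_network_base_addr ip_addr subnet_mask (network_base_addr ip_addr subnet_mask)

-- ===== LEMMAS AND PROOFS =====

-- the 8-bit binary block of an octet value, most significant bit first
def bits8 (v : Nat) : List Char := (List.range 8).map (fun k => if v.testBit (7 - k) then '1' else '0')
-- the numeric value of an octet string (meaningful when pvOkOctet holds)
def nVal (s : List Char) : Nat := ((PySem.Int.ofChars? s).getD 0).toNat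
-- the character AND of A's third loop
def andc (sc bc : Char) : Char := if sc == '1' && bc == '1' then '1' else '0'

lemma len_bits8 (v : Nat) : (bits8 v).length = 8 := by simp [bits8]

set_option maxRecDepth 10000 in
lemma zfill_slice_bin_eq_bits8 : ∀ v : Nat, v < 256 →
    PySem.Chars.zfill (PySem.List.slice (pvBin (v : Int)) (some 2) none) 8 = bits8 v := by decide

set_option maxRecDepth 10000 in
lemma ofCharsBase?_bits8 : ∀ v : Nat, v < 256 → PySem.Int.ofCharsBase? (bits8 v) 2 = some (v : Int) := by decide

lemma okOctet_val {s : List Char} (h : pvOkOctet s = true) :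
    PySem.Int.ofChars? s = some ((nVal s : Nat) : Int) ∧ nVal s < 256 := by
  unfold pvOkOctet at h
  unfold nVal
  cases hv : PySem.Int.ofChars? s with
  | none => rw [hv] at h; simp at h
  | some v =>
    rw [hv] at h
    simp only [decide_eq_true_eq] at h
    constructor
    · simp [Int.toNat_of_nonneg h.1]
    · simp; omega

lemma block_ok {s : List Char} (h : pvOkOctet s = true) : pvBlock s = bits8 (nVal s) := by
  obtain ⟨hv, hlt⟩ := okOctet_val h
  unfold pvBlock
  rw [hv]
  simpa using zfill_slice_bin_eq_bits8 (nVal s) hlt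

lemma insert_len {α : Type} (acc : List α) (x : α) :
    PySem.List.insert acc (acc.length : Int) x = acc ++ [x] := by
  simp [PySem.List.insert, PySem.List.sliceIndices]
  rw [if_neg (by omega)]
  simp

lemma insert_idx_loop {β : Type} (n : Nat) (g : Int → β) :
    (PySem.List.pyRange 0 (n : Int)).foldl (fun acc i => PySem.List.insert acc i (g i)) []
      = (List.range n).map (fun (k : Nat) => g ((k : Int))) := by
  induction n with
  | zero => rfl
  | succ m ih =>
    have hcast : ((m + 1 : Nat) : Int) = (m : Int) + 1 := by push_cast; ring
    rw [hcast, PySem.List.pyRange_one_succ_right (by positivity), List.foldl_append, ih,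
      List.range_succ, List.map_append]
    simp only [List.foldl_cons, List.foldl_nil, List.map_cons, List.map_nil]
    have h := insert_len ((List.range m).map (fun (k : Nat) => g ((k : Int)))) (g (m : Int))
    simpa using h

-- ''.join with empty separator is flatten
lemma join_nil_sep : ∀ bs : List (List Char), PySem.Chars.join [] bs = bs.flatten := by
  intro bs
  induction bs with
  | nil => simp [PySem.Chars.join_nil]
  | cons b bs ih =>
    cases bs with
    | nil => simp [PySem.Chars.join, List.intercalate]
    | cons c cs =>
      rw [PySem.Chars.join_cons_cons, ih]
      simp

lemma flatten_len8 {bs : List (List Char)} (h : ∀ b ∈ bs, b.length = 8) :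
    bs.flatten.length = 8 * bs.length := by
  induction bs with
  | nil => simp
  | cons b t ih =>
    simp only [List.flatten_cons, List.length_append, List.length_cons]
    rw [h b (by simp), ih (fun x hx => h x (by simp [hx]))]
    ring

-- A's first two loops (insert at the running index) build the per-octet block list
lemma map_loop (l : List (List Char)) :
    (PySem.List.pyRange 0 (PySem.List.len l)).foldl
      (fun acc i => PySem.List.insert acc i (pvBlock (PySem.List.pyGetD l i []))) []
      = l.map pvBlock := by
  have hl : PySem.List.len l = (l.length : Int) := by simp [PySem.List.len]
  rw [hl, insert_idx_loop l.length (fun i => pvBlock (PySem.List.pyGetD l i []))]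
  apply List.ext_getElem
  · simp
  · intro k h1 h2
    simp only [List.getElem_map, List.getElem_range]
    rw [PySem.List.pyGetD_natCast]
    congr 1
    simp at h1
    rw [List.getD_eq_getElem _ _ (by simpa using h1)]

-- A's third loop is a character-wise zipWith (truncated to the mask's bits)
lemma and_loop (X Y : List Char) (h : X.length ≤ Y.length) :
    (PySem.List.pyRange 0 (PySem.List.len X)).foldl
      (fun acc a => if (PySem.List.pyGetD X a ' ' == '1' && PySem.List.pyGetD Y a ' ' == '1') = true
                    then PySem.List.insert acc a '1' else PySem.List.insert acc a '0') []
      = List.zipWith andc X Y := by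
  have hbody : (fun (acc : List Char) (a : Int) =>
      if (PySem.List.pyGetD X a ' ' == '1' && PySem.List.pyGetD Y a ' ' == '1') = true
      then PySem.List.insert acc a '1' else PySem.List.insert acc a '0')
      = (fun acc a => PySem.List.insert acc a
          (if (PySem.List.pyGetD X a ' ' == '1' && PySem.List.pyGetD Y a ' ' == '1') = true then '1' else '0')) := by
    funext acc a; split <;> rfl
  have hl : PySem.List.len X = (X.length : Int) := by simp [PySem.List.len]
  rw [hbody, hl, insert_idx_loop]
  apply List.ext_getElem
  · simp
    omega
  · intro k h1 h2
    simp only [List.getElem_map, List.getElem_range, List.getElem_zipWith]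
    simp at h1
    rw [PySem.List.pyGetD_natCast, PySem.List.pyGetD_natCast,
      List.getD_eq_getElem _ _ (by omega), List.getD_eq_getElem _ _ (by omega)]
    rfl

lemma and_bits8 (b a : Nat) : List.zipWith andc (bits8 b) (bits8 a) = bits8 (b &&& a) := by
  unfold bits8
  rw [List.zipWith_map, List.zipWith_self]
  apply List.map_congr_left
  intro k _
  cases h1 : b.testBit (7 - k) <;> cases h2 : a.testBit (7 - k) <;>
    simp [andc, h1, h2]

lemma zip_flatten : ∀ (As Bs : List (List Char)),
    (∀ a ∈ As, a.length = 8) → (∀ b ∈ Bs, b.length = 8) →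
    List.zipWith andc As.flatten Bs.flatten = (List.zipWith (List.zipWith andc) As Bs).flatten := by
  intro As
  induction As with
  | nil => intro Bs _ _; simp
  | cons a As ih =>
    intro Bs hA hB
    cases Bs with
    | nil => simp
    | cons b Bs =>
      simp only [List.flatten_cons, List.zipWith_cons_cons]
      rw [List.zipWith_append (by rw [hA a (by simp), hB b (by simp)]),
        ih Bs (fun x hx => hA x (by simp [hx])) (fun x hx => hB x (by simp [hx]))]

lemma drop_flatten8 : ∀ (bs : List (List Char)) (k : Nat), (∀ b ∈ bs, b.length = 8) →
    bs.flatten.drop (8 * k) = (bs.drop k).flatten := by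
  intro bs
  induction bs with
  | nil => intro k _; simp
  | cons b t ih =>
    intro k h
    cases k with
    | zero => simp
    | succ m =>
      have hb : b.length = 8 := h b (by simp)
      simp only [List.flatten_cons, List.drop_succ_cons]
      have he : 8 * (m + 1) = b.length + 8 * m := by omega
      rw [he]
      simp only [List.drop_append]
      rw [List.drop_eq_nil_of_le (by omega),
        show b.length + 8 * m - b.length = 8 * m by omega,
        ih m (fun x hx => h x (by simp [hx]))]
      simp

lemma chunk_slice {bs : List (List Char)} (h : ∀ b ∈ bs, b.length = 8) {k : Nat} (hk : k < bs.length) :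
    PySem.List.slice bs.flatten (some ((8 * k : Nat) : Int)) (some ((8 * k + 8 : Nat) : Int)) = bs[k] := by
  rw [PySem.List.slice_natCast, drop_flatten8 bs k h]
  have hdrop : bs.drop k = bs[k] :: bs.drop (k + 1) := List.drop_eq_getElem_cons hk
  rw [hdrop]
  simp only [List.flatten_cons]
  have hlen : bs[k].length = 8 := h _ (by exact List.getElem_mem hk)
  have h8 : 8 * k + 8 - 8 * k = 8 := by omega
  rw [h8, ← hlen, List.take_left]

-- A's fourth loop re-chunks the AND'ed bit string into the per-octet values
lemma chunk_loop (bs : List (List Char)) (h : ∀ b ∈ bs, b.length = 8) :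
    (PySem.List.pyRange 0 (PySem.List.len bs.flatten) 8).foldl
      (fun acc f => acc ++ [(PySem.Int.ofCharsBase? (PySem.List.slice bs.flatten (some f) (some (f + 8))) 2).getD 0]) []
      = bs.map (fun b => (PySem.Int.ofCharsBase? b 2).getD 0) := by
  have hlen : PySem.List.len bs.flatten = ((8 * bs.length : Nat) : Int) := by
    simp [PySem.List.len, flatten_len8 h]
  rcases Nat.eq_zero_or_pos bs.length with h0 | h0
  · rw [List.length_eq_zero_iff] at h0
    subst h0
    rfl
  · rw [hlen, PySem.List.pyRange_of_pos 0 _ (by norm_num), PySem.List.foldl_append_singleton_eq_map]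
    have hm : (((8 * bs.length : Nat) : Int) - 0 + 8 - 1) / 8 = (bs.length : Int) := by omega
    rw [if_pos (by exact_mod_cast Nat.mul_pos (by norm_num) h0), hm, Int.toNat_natCast]
    apply List.ext_getElem
    · simp
    · intro k h1 h2
      simp only [List.nil_append, List.getElem_map, List.getElem_range]
      simp only [List.nil_append, List.length_map, List.length_range] at h1
      have e2 : (0 : Int) + 8 * (k : Int) + 8 = ((8 * k + 8 : Nat) : Int) := by push_cast; ring
      have e1 : (0 : Int) + 8 * (k : Int) = ((8 * k : Nat) : Int) := by push_cast; ring
      rw [e2, e1, chunk_slice h (by exact h1)]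

-- A's last loop stringifies each value
lemma result_loop (t : List Int) :
    (PySem.List.pyRange 0 (PySem.List.len t)).foldl
      (fun acc r => acc ++ [PySem.Int.toChars (PySem.List.pyGetD t r 0)]) []
      = t.map PySem.Int.toChars := by
  rw [PySem.List.foldl_append_singleton_eq_map,
    show (fun r => PySem.Int.toChars (PySem.List.pyGetD t r 0))
       = PySem.Int.toChars ∘ (fun j => PySem.List.pyGetD t j 0) from rfl,
    ← List.map_map, PySem.List.map_pyGetD_pyRange_zero]
  simp

lemma main_eq (ip_addr subnet_mask : String)
    (hlen : (PySem.Chars.splitOn subnet_mask.toList ['.']).length ≤ (PySem.Chars.splitOn ip_addr.toList ['.']).length)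
    (hall : ((PySem.Chars.splitOn ip_addr.toList ['.'] ++ PySem.Chars.splitOn subnet_mask.toList ['.']).all pvOkOctet) = true) :
    network_base_addr ip_addr subnet_mask = network_base_addr_alt ip_addr subnet_mask := by
  simp only [List.all_append, Bool.and_eq_true, List.all_eq_true] at hall
  obtain ⟨hIok, hSok⟩ := hall
  unfold network_base_addr network_base_addr_alt
  set I := PySem.Chars.splitOn ip_addr.toList ['.'] with hIdef
  set S := PySem.Chars.splitOn subnet_mask.toList ['.'] with hSdef
  have hIbits : I.map pvBlock = I.map (fun s => bits8 (nVal s)) :=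
    List.map_congr_left (fun s hs => block_ok (hIok s hs))
  have hSbits : S.map pvBlock = S.map (fun s => bits8 (nVal s)) :=
    List.map_congr_left (fun s hs => block_ok (hSok s hs))
  have h8 : ∀ (l : List (List Char)), ∀ b ∈ l.map (fun s => bits8 (nVal s)), b.length = 8 := by
    intro l b hb
    obtain ⟨s, _, rfl⟩ := List.mem_map.mp hb
    exact len_bits8 _
  simp only [map_loop, join_nil_sep, hIbits, hSbits]
  rw [and_loop _ _ (by
      rw [flatten_len8 (h8 S), flatten_len8 (h8 I), List.length_map, List.length_map]
      omega)]
  rw [zip_flatten _ _ (h8 S) (h8 I)]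
  have hzip : List.zipWith (List.zipWith andc) (S.map (fun s => bits8 (nVal s))) (I.map (fun s => bits8 (nVal s)))
      = (S.zip I).map (fun p => bits8 (nVal p.1 &&& nVal p.2)) := by
    rw [List.zipWith_map, ← List.map_uncurry_zip_eq_zipWith]
    exact List.map_congr_left (fun p _ => and_bits8 _ _)
  rw [hzip, chunk_loop _ (by
      intro b hb
      obtain ⟨p, _, rfl⟩ := List.mem_map.mp hb
      exact len_bits8 _)]
  rw [List.map_map]
  have htemp : (S.zip I).map ((fun b => (PySem.Int.ofCharsBase? b 2).getD 0) ∘ fun p => bits8 (nVal p.1 &&& nVal p.2))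
      = (S.zip I).map (fun p => ((nVal p.1 &&& nVal p.2 : Nat) : Int)) := by
    apply List.map_congr_left
    intro p hp
    obtain ⟨hp1, hp2⟩ := List.of_mem_zip hp
    have hb : nVal p.1 &&& nVal p.2 < 256 :=
      lt_of_le_of_lt (Nat.and_le_left) (okOctet_val (hSok _ hp1)).2
    simp [ofCharsBase?_bits8 _ hb]
  rw [htemp, result_loop, List.map_map]
  have hB : (I.zip S).map (fun p =>
      PySem.Int.toChars (PySem.Int.band ((PySem.Int.ofChars? p.1).getD 0) ((PySem.Int.ofChars? p.2).getD 0)))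
      = (I.zip S).map (fun p => PySem.Int.toChars ((nVal p.1 &&& nVal p.2 : Nat) : Int)) := by
    apply List.map_congr_left
    intro p hp
    obtain ⟨hp1, hp2⟩ := List.of_mem_zip hp
    rw [(okOctet_val (hIok _ hp1)).1, (okOctet_val (hSok _ hp2)).1]
    simp [PySem.Int.band_natCast]
  rw [hB, ← List.zip_swap S I, List.map_map]
  congr 1
  apply congrArg
  apply List.map_congr_left
  intro p _
  simp [Function.comp, Nat.land_comm]

-- ===== VERDICT (by name: the statement is the Claim_ definition above) =====
theorem network_base_addr_spec : Claim_equal_network_base_addr := by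
  intro ip_addr subnet_mask _ hpre
  unfold Spec_network_base_addr
  exact main_eq ip_addr subnet_mask hpre.1 hpre.2
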